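-- pv_equiv track=rewrite | github.com/12yearsoldcoder/codelesson | 3.py | solution
-- ===== SOURCE A (Python) =====
-- def solution(lines):
--     answer = 0
--     cnt = []
--     for i in lines: # i = 리스트
--         for j in range(min(i),max(i)):
--             if j not in cnt:
--                 cnt.append(j)
--             else:
--                 del cnt[cnt.index(j)]
--                 answer += 1
--     return answer
-- ===== SOURCE B (Python) =====
-- def solution(lines):
--     pts = []
--     for i in lines:
--         pts.extend(range(min(i), max(i)))
--     pts.sort()
--     answer = 0
--     k = 0
--     n = len(pts)
--     while k + 1 < n:
--         if pts[k] == pts[k + 1]: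
--             answer += 1
--             k += 2
--         else:
--             k += 1
--     return answer
-- ===== Notes on version B (the rewrite author's own statement) =====
-- stated objective: faster
-- what changed: Replaces A's online toggle list (membership scan, list.index and delete per point) with a sort-then-scan: flatten all range points into one list, sort it, then walk it once pairing up adjacent equal values.
import Mathlib
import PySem

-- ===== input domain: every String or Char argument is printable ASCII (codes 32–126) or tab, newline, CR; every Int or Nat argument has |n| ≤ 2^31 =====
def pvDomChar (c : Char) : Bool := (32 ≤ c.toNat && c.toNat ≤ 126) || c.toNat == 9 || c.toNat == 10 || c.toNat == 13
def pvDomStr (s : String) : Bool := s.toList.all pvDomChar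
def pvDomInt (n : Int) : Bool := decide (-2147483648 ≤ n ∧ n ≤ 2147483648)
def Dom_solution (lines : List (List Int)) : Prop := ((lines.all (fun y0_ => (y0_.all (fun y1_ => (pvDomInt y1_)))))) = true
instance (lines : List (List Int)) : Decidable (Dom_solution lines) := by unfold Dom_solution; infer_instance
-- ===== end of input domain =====

-- B replaces A's online toggle list (scan + index + delete per point) with
-- flatten-all-range-points, sort, then one pass pairing adjacent equal values (faster).

-- ===== PORT A =====
-- inner loop body: if j not in cnt: cnt.append(j) else: del cnt[cnt.index(j)]; answer += 1
def pvStepA (st : Int × List Int) (j : Int) : Int × List Int :=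
  if j ∉ st.2 then (st.1, st.2 ++ [j])
  else
    match PySem.List.index? st.2 j with
    | some k => (st.1 + 1, st.2.eraseIdx k)
    | none => st   -- unreachable: j ∈ cnt

-- one line: for j in range(min(i), max(i)); min/max of an empty line raise (excluded by Pre_)
def pvLineA (st : Int × List Int) (i : List Int) : Int × List Int :=
  match PySem.List.min? i (fun x => x), PySem.List.max? i (fun x => x) with
  | some mn, some mx => (PySem.List.pyRange mn mx 1).foldl pvStepA st
  | _, _ => st

def solution (lines : List (List Int)) : Int :=
  (lines.foldl pvLineA (0, ([] : List Int))).1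

-- ===== PORT B =====
-- pts.extend(range(min(i), max(i)))
def pvRangeOf (i : List Int) : List Int :=
  match PySem.List.min? i (fun x => x), PySem.List.max? i (fun x => x) with
  | some mn, some mx => PySem.List.pyRange mn mx 1
  | _, _ => []

-- the while loop over the sorted list: k advances by 2 past an equal adjacent pair
-- (counting it), by 1 otherwise; transcribed as recursion on the suffix at k
def pvPairScan : List Int → Int
  | a :: b :: t => if a = b then 1 + pvPairScan t else pvPairScan (b :: t)
  | _ => 0

def solution_alt (lines : List (List Int)) : Int :=
  pvPairScan (PySem.List.sorted
    (lines.foldl (fun acc i => acc ++ pvRangeOf i) []) (fun x => x) false)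

-- ===== PRECONDITION & SPEC =====
-- Pre_ excludes inputs containing an empty line, on which both A and B raise ValueError (min of empty sequence).
def Pre_solution (lines : List (List Int)) : Prop := ∀ i ∈ lines, i ≠ []
instance (lines : List (List Int)) : Decidable (Pre_solution lines) := by unfold Pre_solution; infer_instance

def pvWitness_solution : List (List Int) := [[0, 3], [1, 2]]

def Spec_solution (lines : List (List Int)) (out : Int) : Prop := out = solution_alt lines
instance (lines : List (List Int)) (out : Int) : Decidable (Spec_solution lines out) := by unfold Spec_solution; infer_instance

-- ===== CLAIM (what is proved, stated in full; the proofs are below) =====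
def Claim_equal_solution : Prop := ∀ (lines : List (List Int)), Dom_solution lines → Pre_solution lines → Spec_solution lines (solution lines)

-- ===== LEMMAS AND PROOFS =====

-- the number of values occurring an odd number of times in l
def pvOdd (l : List Int) : Finset Int := l.toFinset.filter (fun x => l.count x % 2 = 1)

-- one A step: nodup preserved, 2*answer + |cnt| grows by 1, membership is toggled at j
lemma pv_stepA (ans : Int) (cnt : List Int) (j : Int) (hnd : cnt.Nodup) :
    ((pvStepA (ans, cnt) j).2).Nodup ∧
    2 * (pvStepA (ans, cnt) j).1 + ((pvStepA (ans, cnt) j).2.length : Int)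
      = 2 * ans + (cnt.length : Int) + 1 ∧
    ∀ x, x ∈ (pvStepA (ans, cnt) j).2 ↔ ((x ∈ cnt ∧ x ≠ j) ∨ (x ∉ cnt ∧ x = j)) := by
  by_cases hj : j ∈ cnt
  · obtain ⟨k, hk⟩ := Option.isSome_iff_exists.mp ((PySem.List.index?_isSome_iff cnt j).mpr hj)
    have herase : cnt.eraseIdx k = cnt.erase j := by
      rw [List.erase_eq_eraseIdx]
      rw [PySem.List.index?_eq_idxOf?] at hk
      rw [hk]
    have hstep : pvStepA (ans, cnt) j = (ans + 1, cnt.erase j) := by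
      unfold pvStepA
      simp only [hj, not_true_eq_false, if_false, hk]
      rw [herase]
    rw [hstep]
    refine ⟨hnd.erase j, ?_, ?_⟩
    · have hlen : (cnt.erase j).length = cnt.length - 1 := List.length_erase_of_mem hj
      have hpos : 0 < cnt.length := List.length_pos_of_mem hj
      simp only [hlen]
      omega
    · intro x
      rw [hnd.mem_erase_iff]
      constructor
      · rintro ⟨hne, hx⟩; exact Or.inl ⟨hx, hne⟩
      · rintro (⟨hx, hne⟩ | ⟨hx, rfl⟩)
        · exact ⟨hne, hx⟩
        · exact absurd hj hx
  · have hstep : pvStepA (ans, cnt) j = (ans, cnt ++ [j]) := by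
      unfold pvStepA; simp [hj]
    rw [hstep]
    refine ⟨hnd.append (List.nodup_singleton j) (List.disjoint_singleton.mpr hj), ?_, ?_⟩
    · simp only [List.length_append, List.length_cons, List.length_nil]
      push_cast; ring
    · intro x
      simp only [List.mem_append, List.mem_singleton]
      constructor
      · rintro (hx | rfl)
        · exact Or.inl ⟨hx, fun h => hj (h ▸ hx)⟩
        · exact Or.inr ⟨hj, rfl⟩
      · rintro (⟨hx, _⟩ | ⟨_, rfl⟩)
        · exact Or.inl hx
        · exact Or.inr rfl

-- A's fold over a list of points: the invariant accumulated over the whole list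
lemma pv_foldA (pts : List Int) : ∀ (ans : Int) (cnt : List Int), cnt.Nodup →
    ((pts.foldl pvStepA (ans, cnt)).2).Nodup ∧
    2 * (pts.foldl pvStepA (ans, cnt)).1 + ((pts.foldl pvStepA (ans, cnt)).2.length : Int)
      = 2 * ans + (cnt.length : Int) + pts.length ∧
    ∀ x, (x ∈ (pts.foldl pvStepA (ans, cnt)).2 ↔
      ((x ∈ cnt ∧ pts.count x % 2 = 0) ∨ (x ∉ cnt ∧ pts.count x % 2 = 1))) := by
  induction pts with
  | nil =>
    intro ans cnt h
    refine ⟨h, by simp, ?_⟩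
    intro x; simp
  | cons j rest ih =>
    intro ans cnt h
    obtain ⟨h1, h2, h3⟩ := pv_stepA ans cnt j h
    have hst : pvStepA (ans, cnt) j = ((pvStepA (ans, cnt) j).1, (pvStepA (ans, cnt) j).2) := rfl
    simp only [List.foldl_cons]
    rw [hst]
    obtain ⟨g1, g2, g3⟩ := ih (pvStepA (ans, cnt) j).1 (pvStepA (ans, cnt) j).2 h1
    refine ⟨g1, ?_, ?_⟩
    · rw [g2, h2]
      simp only [List.length_cons]
      push_cast; ring
    · intro x
      rw [g3 x, h3 x]
      by_cases hxj : x = j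
      · subst hxj
        rw [List.count_cons_self]
        by_cases hxc : x ∈ cnt <;> simp [hxc] <;> omega
      · rw [List.count_cons_of_ne (Ne.symm hxj)]
        by_cases hxc : x ∈ cnt <;> simp [hxj, hxc]

-- the pair scan on a sorted list counts, over each value, half its occurrences:
-- 2 * pvPairScan s + |pvOdd s| = |s|
lemma pv_pairScan_sorted (s : List Int) (hs : s.Pairwise (· ≤ ·)) :
    2 * pvPairScan s + ((pvOdd s).card : Int) = s.length := by
  induction s using pvPairScan.induct with
  | case1 a t ih =>
    have ht : t.Pairwise (· ≤ ·) := ((hs.of_cons).of_cons)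
    have hodd : pvOdd (a :: a :: t) = pvOdd t := by
      unfold pvOdd
      ext x
      simp only [Finset.mem_filter, List.mem_toFinset, List.mem_cons]
      by_cases hxa : x = a
      · subst hxa
        rw [List.count_cons_self, List.count_cons_self]
        constructor
        · rintro ⟨-, hpar⟩
          have hmem : x ∈ t := List.count_pos_iff.mp (by omega)
          exact ⟨hmem, by omega⟩
        · rintro ⟨hm, hpar⟩
          exact ⟨Or.inl rfl, by omega⟩
      · rw [List.count_cons_of_ne (Ne.symm hxa), List.count_cons_of_ne (Ne.symm hxa)]
        simp [hxa]
    have hih := ih ht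
    rw [pvPairScan, if_pos rfl, hodd]
    simp only [List.length_cons] at hih ⊢
    push_cast at hih ⊢
    omega
  | case2 a b t hab ih =>
    have hbt : (b :: t).Pairwise (· ≤ ·) := hs.of_cons
    have hal : ∀ y ∈ b :: t, a ≤ y := fun y hy => (List.pairwise_cons.mp hs).1 y hy
    have hanotin : a ∉ b :: t := by
      intro hmem
      rcases List.mem_cons.mp hmem with rfl | hmt
      · exact hab rfl
      · have h1 : a ≤ b := hal b List.mem_cons_self
        have h2 : b ≤ a := (List.pairwise_cons.mp hbt).1 a hmt
        exact hab (le_antisymm h1 h2)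
    have hodd : pvOdd (a :: b :: t) = insert a (pvOdd (b :: t)) := by
      unfold pvOdd
      ext x
      simp only [Finset.mem_filter, Finset.mem_insert, List.mem_toFinset, List.mem_cons]
      by_cases hxa : x = a
      · subst hxa
        have h0 : (b :: t).count x = 0 := List.count_eq_zero_of_not_mem hanotin
        rw [List.count_cons_self]
        simp [h0]
      · rw [List.count_cons_of_ne (Ne.symm hxa)]
        simp [hxa]
    have hacard : (insert a (pvOdd (b :: t))).card = (pvOdd (b :: t)).card + 1 := by
      rw [Finset.card_insert_of_notMem]
      intro hmem
      exact hanotin (List.mem_toFinset.mp (Finset.mem_filter.mp hmem).1)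
    have := ih hbt
    rw [pvPairScan, if_neg hab, hodd, hacard]
    simp only [List.length_cons] at this ⊢
    push_cast at this ⊢
    omega
  | case3 s hshape =>
    clear hs
    rcases s with _ | ⟨a, _ | ⟨b, t⟩⟩
    · simp [pvPairScan, pvOdd]
    · have h1 : pvOdd [a] = {a} := by
        unfold pvOdd
        ext x
        simp only [Finset.mem_filter, List.mem_toFinset, List.mem_cons, List.not_mem_nil,
          or_false, Finset.mem_singleton]
        constructor
        · rintro ⟨rfl, -⟩; rfl
        · rintro rfl; exact ⟨rfl, by simp⟩
      simp [pvPairScan, h1]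
    · exact (hshape a b t rfl).elim

-- A's per-line fold is the fold of pvStepA over that line's range points
lemma pv_lineA_eq (st : Int × List Int) (i : List Int) :
    pvLineA st i = (pvRangeOf i).foldl pvStepA st := by
  unfold pvLineA pvRangeOf
  cases PySem.List.min? i (fun x => x) <;> cases PySem.List.max? i (fun x => x) <;> simp

-- A's whole loop is the fold of pvStepA over the flattened points
lemma pv_solA_flat (lines : List (List Int)) : ∀ (st : Int × List Int),
    lines.foldl pvLineA st = (lines.flatMap pvRangeOf).foldl pvStepA st := by
  induction lines with
  | nil => intro st; simp
  | cons i rest ih =>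
    intro st
    simp only [List.foldl_cons, List.flatMap_cons, List.foldl_append]
    rw [pv_lineA_eq, ih]

-- B's accumulation builds exactly the flattened points
lemma pv_solB_flat (lines : List (List Int)) :
    lines.foldl (fun acc i => acc ++ pvRangeOf i) [] = lines.flatMap pvRangeOf := by
  simpa using PySem.List.foldl_append_eq_flatMap pvRangeOf lines ([] : List Int)

-- ===== VERDICT (by name: the statement is the Claim_ definition above) =====
theorem solution_spec : Claim_equal_solution := by
  intro lines _ _
  unfold Spec_solution solution solution_alt
  rw [pv_solA_flat lines (0, ([] : List Int)), pv_solB_flat lines]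
  set pts := lines.flatMap pvRangeOf with hpts
  obtain ⟨hnd, hlen, hmem⟩ := pv_foldA pts 0 [] List.nodup_nil
  set c := (pts.foldl pvStepA (0, ([] : List Int))).2
  set s := PySem.List.sorted pts (fun x => x) false with hs
  have hperm : s.Perm pts := PySem.List.sorted_perm pts (fun x => x) false
  have hsp : s.Pairwise (· ≤ ·) := PySem.List.sorted_pairwise pts (fun x => x)
  have hscan := pv_pairScan_sorted s hsp
  -- the toggle list c is exactly the odd-count values of pts
  have hcset : c.toFinset = pvOdd pts := by
    unfold pvOdd
    ext x
    simp only [List.mem_toFinset, Finset.mem_filter]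
    rw [hmem x]
    simp only [List.not_mem_nil, false_and, false_or, not_false_eq_true, true_and]
    constructor
    · intro hpar
      exact ⟨List.count_pos_iff.mp (by omega), hpar⟩
    · exact fun h => h.2
  have hccard : (c.length : Int) = ((pvOdd pts).card : Int) := by
    rw [← hcset, List.toFinset_card_of_nodup hnd]
  -- sorting does not change counts, hence not the odd-count set
  have hoddeq : pvOdd s = pvOdd pts := by
    unfold pvOdd
    rw [List.toFinset_eq_of_perm s pts hperm]
    apply Finset.filter_congr
    intro x _
    rw [hperm.count_eq]
  rw [hoddeq] at hscan
  have hlens := hperm.length_eq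
  have h1 : 2 * (List.foldl pvStepA (0, ([] : List Int)) pts).1 + (c.length : Int) = (pts.length : Int) := by
    simpa using hlen
  omega
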